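-- pv_equiv track=rewrite | github.com/LooperLian/DS-DRL | network_DRL.py | mark_vector
-- ===== SOURCE A (Python) =====
-- def mark_vector(vector, default, ii, le):
--     # return 几段可用频率，起点，长度。 [1,0,1,1] —> (2, [0, 2], [1, 2])
--     flag = 0
--     slotscontinue = []
--     slotflag = []
--     while ii <= le - 1:
--         tempvector = vector[ii:le]  # 从ii开始截取slot_temp
--         default_counts = tempvector.count(default)  # 可用频隙数量
--         if default_counts == 0:  # 没有可用频隙
--             break
--         else:
--             a = tempvector.index(default)  # 返回首次出现的位置
--             ii += a  # 跳过前面的0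
--             flag += 1
--             slotflag.append(ii)
--             m = vector[ii + 1:le]
--             m_counts = m.count(1 - default)  # 计算之后0的数量
--             if m_counts != 0:
--                 n = m.index(1 - default)
--                 slotcontinue = n + 1
--                 slotscontinue.append(slotcontinue)
--                 ii += slotcontinue
--             else:  # 之后都是1
--                 slotscontinue.append(le - ii)  # 都加入slotscontinue
--                 break
--     return flag, slotflag, slotscontinue
-- ===== SOURCE B (Python) =====
-- def mark_vector(vector, default, ii, le):
--     # Single linear pass over absolute indices: no slicing, no count(), no .index().
--     n = len(vector)
--     hi = min(le, n)
--     other = 1 - default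
--     starts = []
--     lengths = []
--     i = ii
--     while i < hi:
--         while i < hi and vector[i] != default:
--             i += 1
--         if i >= hi:
--             break
--         starts.append(i)
--         j = i + 1
--         while j < hi and vector[j] != other:
--             j += 1
--         if j < hi:
--             lengths.append(j - i)
--             i = j
--         else:
--             lengths.append(le - i)
--             break
--     return len(starts), starts, lengths
-- ===== Notes on version B (the rewrite author's own statement) =====
-- stated objective: alternative
-- what changed: Replaced the per-iteration slicing plus count() plus index() rescans by a single linear pass over absolute indices with two pointer-advancing inner scans (no list copies); measured speed is comparable, the change is structural.
-- outside the precondition, e.g. on mark_vector([2, -1], 2, -4, 1): A returns (1, [-4], [5]), B raises IndexError; on mark_vector([0, -2, 2, 0], 2, -2, 1): A returns (0, [], []), B returns (1, [-2], [3])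
import Mathlib
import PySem

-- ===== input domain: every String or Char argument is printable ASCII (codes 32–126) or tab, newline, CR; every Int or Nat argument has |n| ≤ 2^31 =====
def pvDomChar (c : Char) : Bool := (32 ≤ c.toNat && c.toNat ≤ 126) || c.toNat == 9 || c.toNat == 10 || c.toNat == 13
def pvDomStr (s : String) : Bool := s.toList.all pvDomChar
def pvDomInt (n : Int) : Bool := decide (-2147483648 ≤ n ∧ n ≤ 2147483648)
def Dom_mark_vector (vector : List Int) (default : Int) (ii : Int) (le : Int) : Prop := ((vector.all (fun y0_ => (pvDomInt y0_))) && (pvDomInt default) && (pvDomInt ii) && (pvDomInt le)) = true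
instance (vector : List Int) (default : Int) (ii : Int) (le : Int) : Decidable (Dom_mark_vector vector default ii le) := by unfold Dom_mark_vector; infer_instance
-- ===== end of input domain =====

-- B replaces A's per-iteration slice/count/index rescans by one linear pass over
-- absolute indices; Pre_ restricts to the natural domain 0 ≤ ii (a slot start position).


-- ===== PORT A =====
-- Literal transliteration of A's while loop.  `fuel` is only a structural totality guard:
-- every iteration increases ii by at least 1, so fuel = (le - ii).toNat never runs out.
-- `a`/`n` are guarded by the count checks, so `.getD 0` is exact where Python's .index is reached.
def mark_vector_loopA (vector : List Int) (default : Int) (le : Int) :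
    Nat → Int → Int → List Int → List Int → Int × List Int × List Int
  | 0, _ii, flag, slotflag, slotscontinue => (flag, slotflag, slotscontinue)
  | fuel + 1, ii, flag, slotflag, slotscontinue =>
    if ii ≤ le - 1 then
      let tempvector := PySem.List.slice vector (some ii) (some le)
      let default_counts := PySem.List.count tempvector default
      if default_counts = 0 then (flag, slotflag, slotscontinue)
      else
        let a : Nat := (PySem.List.index? tempvector default).getD 0
        let ii2 := ii + (a : Int)
        let flag2 := flag + 1
        let slotflag2 := slotflag ++ [ii2]
        let m := PySem.List.slice vector (some (ii2 + 1)) (some le)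
        let m_counts := PySem.List.count m (1 - default)
        if m_counts ≠ 0 then
          let n : Nat := (PySem.List.index? m (1 - default)).getD 0
          let slotcontinue : Int := (n : Int) + 1
          mark_vector_loopA vector default le fuel (ii2 + slotcontinue) flag2 slotflag2 (slotscontinue ++ [slotcontinue])
        else
          (flag2, slotflag2, slotscontinue ++ [le - ii2])
    else (flag, slotflag, slotscontinue)

def mark_vector (vector : List Int) (default : Int) (ii : Int) (le : Int) : Int × List Int × List Int :=
  mark_vector_loopA vector default le (le - ii).toNat ii 0 [] []

-- ===== PORT B =====
-- inner while loops of B: advance i while i < hi and vector[i] != x.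
-- fuel = (hi - i).toNat is a structural totality guard; i advances by exactly 1.
def scanToF (vector : List Int) (x : Int) (hi : Int) : Int → Nat → Int
  | i, 0 => i
  | i, fuel + 1 =>
    if i < hi then
      if PySem.List.pyGetD vector i 0 ≠ x then scanToF vector x hi (i + 1) fuel else i
    else i

def scanTo (vector : List Int) (x : Int) (i : Int) (hi : Int) : Int :=
  scanToF vector x hi i (hi - i).toNat

-- outer while loop of B (fuel = (hi - i).toNat is a structural totality guard:
-- every iteration strictly increases i)
def mark_vector_loopB (vector : List Int) (default : Int) (other : Int) (hi : Int) (le : Int) :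
    Nat → Int → List Int → List Int → Int × List Int × List Int
  | 0, _i, starts, lengths => ((starts.length : Int), starts, lengths)
  | fuel + 1, i, starts, lengths =>
    if i < hi then
      let i' := scanTo vector default i hi
      if i' ≥ hi then ((starts.length : Int), starts, lengths)
      else
        let starts' := starts ++ [i']
        let j := scanTo vector other (i' + 1) hi
        if j < hi then
          mark_vector_loopB vector default other hi le fuel j starts' (lengths ++ [j - i'])
        else ((starts'.length : Int), starts', lengths ++ [le - i'])
    else ((starts.length : Int), starts, lengths)

def mark_vector_alt (vector : List Int) (default : Int) (ii : Int) (le : Int) : Int × List Int × List Int :=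
  mark_vector_loopB vector default (1 - default) (min le (vector.length : Int)) le
    ((min le (vector.length : Int) - ii).toNat) ii [] []

-- ===== PRECONDITION & SPEC =====
-- Pre_ excludes negative start indices ii, outside the function's natural domain (ii is a
-- slot start position): there A mixes Python's clamping slice semantics with the raw negative
-- index, while B's direct indexing wraps around or raises IndexError.
def Pre_mark_vector (vector : List Int) (default : Int) (ii : Int) (le : Int) : Prop := 0 ≤ ii
instance (vector : List Int) (default : Int) (ii : Int) (le : Int) : Decidable (Pre_mark_vector vector default ii le) := by unfold Pre_mark_vector; infer_instance

def pvWitness_mark_vector : List Int × Int × Int × Int := ([1, 0, 1, 1], 1, 0, 4)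

def Spec_mark_vector (vector : List Int) (default : Int) (ii : Int) (le : Int) (out : Int × List Int × List Int) : Prop := out = mark_vector_alt vector default ii le
instance (vector : List Int) (default : Int) (ii : Int) (le : Int) (out : Int × List Int × List Int) : Decidable (Spec_mark_vector vector default ii le out) := by unfold Spec_mark_vector; infer_instance

-- ===== CLAIM (what is proved, stated in full; the proofs are below) =====
def Claim_equal_mark_vector : Prop := ∀ (vector : List Int) (default : Int) (ii : Int) (le : Int), Dom_mark_vector vector default ii le → Pre_mark_vector vector default ii le → Spec_mark_vector vector default ii le (mark_vector vector default ii le)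

-- ===== LEMMAS AND PROOFS =====

-- one-step characterisations of the inner scan (fuel is exact: i advances by exactly 1)
theorem scanTo_stop (vector : List Int) (x i hi : Int) (h : ¬ i < hi) :
    scanTo vector x i hi = i := by
  have h0 : (hi - i).toNat = 0 := by omega
  rw [scanTo, h0, scanToF]

theorem scanTo_unfold (vector : List Int) (x i hi : Int) (h : i < hi) :
    scanTo vector x i hi
      = if PySem.List.pyGetD vector i 0 ≠ x then scanTo vector x (i + 1) hi else i := by
  have h0 : (hi - i).toNat = (hi - (i + 1)).toNat + 1 := by omega
  rw [scanTo, h0, scanToF, if_pos h, scanTo]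

theorem scanTo_ge (vector : List Int) (x i hi : Int) : i ≤ scanTo vector x i hi := by
  induction hd : (hi - i).toNat using Nat.strong_induction_on generalizing i with
  | _ d IHd =>
  by_cases h : i < hi
  · rw [scanTo_unfold vector x i hi h]
    by_cases hne : PySem.List.pyGetD vector i 0 ≠ x
    · rw [if_pos hne]
      have := IHd ((hi - (i + 1)).toNat) (by omega) (i + 1) rfl
      omega
    · rw [if_neg hne]
  · rw [scanTo_stop vector x i hi h]

-- one-step unfolding of the slice when the head index is inside [0, min le n)
theorem slice_cons_step (vector : List Int) (i le : Int) (h0 : 0 ≤ i)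
    (hn : i < (vector.length : Int)) (hle : i < le) :
    PySem.List.slice vector (some i) (some le)
      = vector[i.toNat]'(by omega) :: PySem.List.slice vector (some (i + 1)) (some le) := by
  rw [PySem.List.slice_toNat vector h0 (by omega), PySem.List.slice_toNat vector (by omega) (by omega)]
  rw [List.drop_eq_getElem_cons (by omega)]
  have h1 : le.toNat - i.toNat = (le.toNat - (i + 1).toNat) + 1 := by omega
  rw [h1, List.take_succ_cons]
  have h2 : (i + 1).toNat = i.toNat + 1 := by omega
  rw [h2]

theorem slice_nil_of_ge (vector : List Int) (i le : Int) (h0 : 0 ≤ i) (hle : 0 ≤ le)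
    (h : ¬ i < min le (vector.length : Int)) :
    PySem.List.slice vector (some i) (some le) = [] := by
  rw [PySem.List.slice_toNat vector h0 hle, List.take_eq_nil_iff]
  by_cases h1 : i < (vector.length : Int)
  · left; omega
  · right; rw [List.drop_eq_nil_iff]; omega

-- the scan result characterises Python's .index on the slice
theorem scan_index (vector : List Int) (x i le : Int) (h0 : 0 ≤ i) (hle : 0 ≤ le) :
    PySem.List.index? (PySem.List.slice vector (some i) (some le)) x
      = if scanTo vector x i (min le (vector.length : Int)) < min le (vector.length : Int)
        then some (scanTo vector x i (min le (vector.length : Int)) - i).toNat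
        else none := by
  induction hd : (min le (vector.length : Int) - i).toNat using Nat.strong_induction_on generalizing i with
  | _ d IHd =>
  by_cases h : i < min le (vector.length : Int)
  · rw [slice_cons_step vector i le h0 (by omega) (by omega)]
    have hget : PySem.List.pyGetD vector i 0 = vector[i.toNat]'(by omega) :=
      PySem.List.pyGetD_eq_getElem vector 0 h0 (by omega)
    rw [scanTo_unfold vector x i _ h]
    by_cases hne : PySem.List.pyGetD vector i 0 ≠ x
    · simp only [if_pos hne]
      rw [PySem.List.index?_cons_of_ne _ (by rw [hget] at hne; exact hne)]
      rw [IHd ((min le (vector.length : Int) - (i + 1)).toNat) (by omega) (i + 1) (by omega) rfl]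
      have hge : i + 1 ≤ scanTo vector x (i + 1) (min le (vector.length : Int)) :=
        scanTo_ge vector x (i + 1) (min le (vector.length : Int))
      by_cases hlt : scanTo vector x (i + 1) (min le (vector.length : Int)) < min le (vector.length : Int)
      · simp [hlt]; omega
      · simp [hlt]
    · simp only [if_neg hne]
      rw [hget] at hne
      rw [not_not.mp hne, PySem.List.index?_cons_self]
      simp [h]
  · rw [slice_nil_of_ge vector i le h0 hle h, scanTo_stop vector x i _ h]
    simp [h]

theorem main_loop_eq (vector : List Int) (default le : Int) :
    ∀ (fuelA fuelB : Nat) (ii flag : Int) (sf sc : List Int), 0 ≤ ii → flag = (sf.length : Int) →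
      (le - ii).toNat ≤ fuelA → (min le (vector.length : Int) - ii).toNat ≤ fuelB →
      mark_vector_loopA vector default le fuelA ii flag sf sc
        = mark_vector_loopB vector default (1 - default) (min le (vector.length : Int)) le fuelB ii sf sc := by
  intro fuelA
  induction fuelA with
  | zero =>
    intro fuelB ii flag sf sc h0 hflag hfA hfB
    have hstop : ¬ ii < min le (vector.length : Int) := by omega
    simp only [mark_vector_loopA]
    cases fuelB with
    | zero => simp only [mark_vector_loopB]; exact congrArg (·, sf, sc) hflag
    | succ fb => simp only [mark_vector_loopB]; rw [if_neg hstop]; exact congrArg (·, sf, sc) hflag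
  | succ fA IH =>
    intro fuelB ii flag sf sc h0 hflag hfA hfB
    simp only [mark_vector_loopA]
    by_cases hcond : ii ≤ le - 1
    · have hle0 : (0:Int) ≤ le := by omega
      have hgp : ii ≤ scanTo vector default ii (min le (vector.length : Int)) :=
        scanTo_ge vector default ii (min le (vector.length : Int))
      have hidxA := scan_index vector default ii le h0 hle0
      rw [if_pos hcond]
      by_cases hplt : scanTo vector default ii (min le (vector.length : Int)) < min le (vector.length : Int)
      · -- a default slot is found at absolute position p
        have hiilt : ii < min le (vector.length : Int) := by omega
        obtain ⟨fb, rfl⟩ : ∃ fb, fuelB = fb + 1 := ⟨fuelB - 1, by omega⟩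
        rw [if_pos hplt] at hidxA
        have hmem : default ∈ PySem.List.slice vector (some ii) (some le) := by
          rw [← PySem.List.index?_isSome_iff, hidxA]; rfl
        have hcnt : ¬ PySem.List.count (PySem.List.slice vector (some ii) (some le)) default = 0 := by
          rw [PySem.List.count_eq, List.count_eq_zero]; exact fun hn => hn hmem
        rw [if_neg hcnt]
        simp only [mark_vector_loopB]
        rw [if_pos hiilt, if_neg (show ¬ scanTo vector default ii (min le (vector.length : Int)) ≥ min le (vector.length : Int) from by omega)]
        rw [hidxA]
        have e1 : ((((scanTo vector default ii (min le (vector.length : Int))) - ii).toNat : Int))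
            = scanTo vector default ii (min le (vector.length : Int)) - ii := Int.toNat_of_nonneg (by omega)
        simp only [Option.getD_some, e1]
        have e2 : ii + (scanTo vector default ii (min le (vector.length : Int)) - ii)
            = scanTo vector default ii (min le (vector.length : Int)) := by omega
        rw [e2]
        have hgq : scanTo vector default ii (min le (vector.length : Int)) + 1
            ≤ scanTo vector (1 - default) (scanTo vector default ii (min le (vector.length : Int)) + 1) (min le (vector.length : Int)) :=
          scanTo_ge vector (1 - default) _ _
        have hidxB := scan_index vector (1 - default) (scanTo vector default ii (min le (vector.length : Int)) + 1) le (by omega) hle0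
        by_cases hqlt : scanTo vector (1 - default) (scanTo vector default ii (min le (vector.length : Int)) + 1) (min le (vector.length : Int)) < min le (vector.length : Int)
        · -- a terminator is found at absolute position q: one more round
          rw [if_pos hqlt] at hidxB
          have hmem2 : (1 - default) ∈ PySem.List.slice vector (some (scanTo vector default ii (min le (vector.length : Int)) + 1)) (some le) := by
            rw [← PySem.List.index?_isSome_iff, hidxB]; rfl
          have hcnt2 : ¬ PySem.List.count (PySem.List.slice vector (some (scanTo vector default ii (min le (vector.length : Int)) + 1)) (some le)) (1 - default) = 0 := by
            rw [PySem.List.count_eq, List.count_eq_zero]; exact fun hn => hn hmem2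
          rw [if_pos hcnt2, hidxB, if_pos hqlt]
          have e3 : ((((scanTo vector (1 - default) (scanTo vector default ii (min le (vector.length : Int)) + 1) (min le (vector.length : Int))) - (scanTo vector default ii (min le (vector.length : Int)) + 1)).toNat : Int))
              = scanTo vector (1 - default) (scanTo vector default ii (min le (vector.length : Int)) + 1) (min le (vector.length : Int)) - (scanTo vector default ii (min le (vector.length : Int)) + 1) :=
            Int.toNat_of_nonneg (by omega)
          simp only [Option.getD_some, e3]
          have e4 : scanTo vector default ii (min le (vector.length : Int))
                + (scanTo vector (1 - default) (scanTo vector default ii (min le (vector.length : Int)) + 1) (min le (vector.length : Int)) - (scanTo vector default ii (min le (vector.length : Int)) + 1) + 1)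
              = scanTo vector (1 - default) (scanTo vector default ii (min le (vector.length : Int)) + 1) (min le (vector.length : Int)) := by omega
          have e5 : scanTo vector (1 - default) (scanTo vector default ii (min le (vector.length : Int)) + 1) (min le (vector.length : Int)) - (scanTo vector default ii (min le (vector.length : Int)) + 1) + 1
              = scanTo vector (1 - default) (scanTo vector default ii (min le (vector.length : Int)) + 1) (min le (vector.length : Int)) - scanTo vector default ii (min le (vector.length : Int)) := by omega
          rw [e4, e5]
          exact IH fb _ _ _ _ (by omega) (by simp [hflag]) (by omega) (by omega)
        · -- no terminator before hi: last run, both append le - p and stop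
          rw [if_neg hqlt] at hidxB
          have hcnt2 : PySem.List.count (PySem.List.slice vector (some (scanTo vector default ii (min le (vector.length : Int)) + 1)) (some le)) (1 - default) = 0 := by
            rw [PySem.List.count_eq, List.count_eq_zero, ← PySem.List.index?_eq_none_iff]; exact hidxB
          rw [if_neg (not_not.mpr hcnt2), if_neg hqlt]
          simp [hflag]
      · -- no default slot in [ii, hi): both stop with the accumulators
        rw [if_neg hplt] at hidxA
        have hcnt : PySem.List.count (PySem.List.slice vector (some ii) (some le)) default = 0 := by
          rw [PySem.List.count_eq, List.count_eq_zero, ← PySem.List.index?_eq_none_iff]; exact hidxA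
        rw [if_pos hcnt]
        by_cases hii : ii < min le (vector.length : Int)
        · obtain ⟨fb, rfl⟩ : ∃ fb, fuelB = fb + 1 := ⟨fuelB - 1, by omega⟩
          simp only [mark_vector_loopB]
          rw [if_pos hii, if_pos (by omega)]
          exact congrArg (·, sf, sc) hflag
        · cases fuelB with
          | zero => simp only [mark_vector_loopB]; exact congrArg (·, sf, sc) hflag
          | succ fb => rw [mark_vector_loopB, if_neg hii]; exact congrArg (·, sf, sc) hflag
    · rw [if_neg hcond]
      have hstop : ¬ ii < min le (vector.length : Int) := by omega
      cases fuelB with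
      | zero => simp only [mark_vector_loopB]; exact congrArg (·, sf, sc) hflag
      | succ fb => simp only [mark_vector_loopB]; rw [if_neg hstop]; exact congrArg (·, sf, sc) hflag

-- ===== VERDICT (by name: the statement is the Claim_ definition above) =====
theorem mark_vector_spec : Claim_equal_mark_vector := by
  intro vector default ii le _hDom hPre
  unfold Spec_mark_vector mark_vector mark_vector_alt
  exact main_loop_eq vector default le _ _ ii 0 [] [] hPre rfl (Nat.le_refl _) (Nat.le_refl _)
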